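-- pv_equiv track=rewrite | github.com/camichaves79/dacionDeBecas | reto5.py | conteoEtnias
-- ===== SOURCE A (Python) =====
-- def conteoEtnias(lista):
--     sinR = 0
--     afro = 0
--     indi = 0
--     rai = 0
--     pale = 0
--     gitano = 0
--     for i in range(len(lista)):
--         if lista[i][3] == "1":
--             if lista[i][0] == "sin reconocimiento":
--                 sinR += 1
--             elif lista[i][0] == "afrodescendiente":
--                 afro += 1
--             elif lista[i][0] == "indigena":
--                 indi +=1
--             elif lista[i][0] == "raizal":
--                 rai += 1
--             elif lista[i][0] == "palenquero":
--                 pale += 1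
--             elif lista[i][0] == "gitano":
--                 gitano += 1
--     continuanEtno = [afro, gitano, indi, pale, rai, sinR]
--     return continuanEtno
-- ===== SOURCE B (Python) =====
-- KEYS = ["afrodescendiente", "gitano", "indigena",
--         "palenquero", "raizal", "sin reconocimiento"]
--
-- def conteoEtnias(lista):
--     quals = [x[0] for x in lista if x[3] == "1"]
--     return [quals.count(k) for k in KEYS]
-- ===== Notes on version B (the rewrite author's own statement) =====
-- stated objective: simpler
-- what changed: Two staged passes instead of one accumulator loop: first project the categories of qualifying records into a list, then count each of the six known keys in that list with list.count; no counters or branch ladder are maintained.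
import Mathlib
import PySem

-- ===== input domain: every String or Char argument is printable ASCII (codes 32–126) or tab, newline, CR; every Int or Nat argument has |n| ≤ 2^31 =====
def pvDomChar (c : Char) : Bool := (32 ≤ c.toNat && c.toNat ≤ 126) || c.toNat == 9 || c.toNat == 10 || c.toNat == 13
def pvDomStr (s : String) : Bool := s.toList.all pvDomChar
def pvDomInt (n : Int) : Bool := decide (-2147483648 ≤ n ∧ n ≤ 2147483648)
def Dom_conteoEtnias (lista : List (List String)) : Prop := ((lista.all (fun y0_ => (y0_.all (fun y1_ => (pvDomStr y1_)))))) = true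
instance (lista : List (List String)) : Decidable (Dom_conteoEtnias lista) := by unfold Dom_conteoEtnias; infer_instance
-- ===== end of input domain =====

-- B replaces A's six named accumulators and if/elif ladder with two staged passes:
-- project the categories of qualifying records, then count each known key in that
-- projection with list.count (simpler decomposition; same asymptotic cost).


-- ===== PORT A =====
-- six counters threaded as a tuple (sinR, afro, indi, rai, pale, gitano), loop over range(len(lista))
def conteoEtnias (lista : List (List String)) : List Int :=
  let st : Int × Int × Int × Int × Int × Int :=
    (PySem.List.pyRange 0 (PySem.List.len lista) 1).foldl
      (fun st i =>
        let r := PySem.List.pyGetD lista i []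
        let (sinR, afro, indi, rai, pale, gitano) := st
        if PySem.List.pyGetD r 3 "" == "1" then
          if PySem.List.pyGetD r 0 "" == "sin reconocimiento" then (sinR + 1, afro, indi, rai, pale, gitano)
          else if PySem.List.pyGetD r 0 "" == "afrodescendiente" then (sinR, afro + 1, indi, rai, pale, gitano)
          else if PySem.List.pyGetD r 0 "" == "indigena" then (sinR, afro, indi + 1, rai, pale, gitano)
          else if PySem.List.pyGetD r 0 "" == "raizal" then (sinR, afro, indi, rai + 1, pale, gitano)
          else if PySem.List.pyGetD r 0 "" == "palenquero" then (sinR, afro, indi, rai, pale + 1, gitano)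
          else if PySem.List.pyGetD r 0 "" == "gitano" then (sinR, afro, indi, rai, pale, gitano + 1)
          else st
        else st)
      (0, 0, 0, 0, 0, 0)
  [st.2.1, st.2.2.2.2.2, st.2.2.1, st.2.2.2.2.1, st.2.2.2.1, st.1]

-- ===== PORT B =====
-- stage 1: project categories of qualifying records; stage 2: count each known key
def pvKEYS : List String :=
  ["afrodescendiente", "gitano", "indigena", "palenquero", "raizal", "sin reconocimiento"]

def conteoEtnias_alt (lista : List (List String)) : List Int :=
  let quals : List String :=
    (lista.filter (fun x => PySem.List.pyGetD x 3 "" == "1")).map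
      (fun x => PySem.List.pyGetD x 0 "")
  pvKEYS.map (fun k => PySem.List.count quals k)

-- ===== PRECONDITION & SPEC =====
-- Pre_ excludes records shorter than 4 fields, on which A raises IndexError at lista[i][3].
def Pre_conteoEtnias (lista : List (List String)) : Prop := ∀ r ∈ lista, 4 ≤ r.length
instance (lista : List (List String)) : Decidable (Pre_conteoEtnias lista) := by unfold Pre_conteoEtnias; infer_instance
def pvWitness_conteoEtnias : List (List String) := [["afrodescendiente", "x", "y", "1"], ["gitano", "a", "b", "0"]]

def Spec_conteoEtnias (lista : List (List String)) (out : List Int) : Prop := out = conteoEtnias_alt lista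
instance (lista : List (List String)) (out : List Int) : Decidable (Spec_conteoEtnias lista out) := by unfold Spec_conteoEtnias; infer_instance

-- ===== CLAIM (what is proved, stated in full; the proofs are below) =====
def Claim_equal_conteoEtnias : Prop := ∀ (lista : List (List String)), Dom_conteoEtnias lista → Pre_conteoEtnias lista → Spec_conteoEtnias lista (conteoEtnias lista)

-- ===== LEMMAS AND PROOFS =====

-- count of qualifying records of category k (proof-only abbreviation)
def pvCnt (lista : List (List String)) (k : String) : Int :=
  ((lista.filter (fun x => PySem.List.pyGetD x 3 "" == "1" && PySem.List.pyGetD x 0 "" == k)).length : Int)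

-- A's loop body as a function of the current record
def pvStepA (st : Int × Int × Int × Int × Int × Int) (r : List String) : Int × Int × Int × Int × Int × Int :=
  let (sinR, afro, indi, rai, pale, gitano) := st
  if PySem.List.pyGetD r 3 "" == "1" then
    if PySem.List.pyGetD r 0 "" == "sin reconocimiento" then (sinR + 1, afro, indi, rai, pale, gitano)
    else if PySem.List.pyGetD r 0 "" == "afrodescendiente" then (sinR, afro + 1, indi, rai, pale, gitano)
    else if PySem.List.pyGetD r 0 "" == "indigena" then (sinR, afro, indi + 1, rai, pale, gitano)
    else if PySem.List.pyGetD r 0 "" == "raizal" then (sinR, afro, indi, rai + 1, pale, gitano)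
    else if PySem.List.pyGetD r 0 "" == "palenquero" then (sinR, afro, indi, rai, pale + 1, gitano)
    else if PySem.List.pyGetD r 0 "" == "gitano" then (sinR, afro, indi, rai, pale, gitano + 1)
    else st
  else st

theorem pvCnt_cons (x : List String) (tl : List (List String)) (k : String) :
    pvCnt (x :: tl) k =
      (if PySem.List.pyGetD x 3 "" == "1" && PySem.List.pyGetD x 0 "" == k then 1 else 0) + pvCnt tl k := by
  simp only [pvCnt, List.filter_cons]
  split_ifs <;> simp
  ring

theorem pvFoldA (l : List (List String)) :
    ∀ s a i r p g : Int,
    l.foldl pvStepA (s, a, i, r, p, g) =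
      (s + pvCnt l "sin reconocimiento", a + pvCnt l "afrodescendiente", i + pvCnt l "indigena",
       r + pvCnt l "raizal", p + pvCnt l "palenquero", g + pvCnt l "gitano") := by
  induction l with
  | nil => intro s a i r p g; simp [pvCnt]
  | cons x tl ih =>
    intro s a i r p g
    simp only [List.foldl_cons, pvStepA]
    split_ifs with h3 h0 h1 h2 hr hp hg
    · have e := beq_iff_eq.mp h0; rw [ih]; simp [pvCnt_cons, e, h3]; omega
    · have e := beq_iff_eq.mp h1; rw [ih]; simp [pvCnt_cons, e, h3]; omega
    · have e := beq_iff_eq.mp h2; rw [ih]; simp [pvCnt_cons, e, h3]; omega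
    · have e := beq_iff_eq.mp hr; rw [ih]; simp [pvCnt_cons, e, h3]; omega
    · have e := beq_iff_eq.mp hp; rw [ih]; simp [pvCnt_cons, e, h3]; omega
    · have e := beq_iff_eq.mp hg; rw [ih]; simp [pvCnt_cons, e, h3]; omega
    · rw [ih]; simp [pvCnt_cons, h3, h0, h1, h2, hr, hp, hg]
    · rw [ih]; simp [pvCnt_cons, h3]

-- B's count over the filtered-and-mapped projection is exactly pvCnt
theorem pvCountB (l : List (List String)) (k : String) :
    PySem.List.count
      ((l.filter (fun x => PySem.List.pyGetD x 3 "" == "1")).map (fun x => PySem.List.pyGetD x 0 "")) k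
      = pvCnt l k := by
  induction l with
  | nil => simp [PySem.List.count, pvCnt]
  | cons x tl ih =>
    rw [pvCnt_cons, ← ih]
    by_cases h3 : PySem.List.pyGetD x 3 "" == "1"
    · simp only [List.filter_cons, h3, if_true, List.map_cons]
      by_cases h0 : PySem.List.pyGetD x 0 "" == k
      · have e := beq_iff_eq.mp h0
        simp [PySem.List.count, e]
        omega
      · have e : PySem.List.pyGetD x 0 "" ≠ k := by simpa using h0
        simp [PySem.List.count, e, h0]
    · simp [h3]

-- ===== VERDICT (by name: the statement is the Claim_ definition above) =====
theorem conteoEtnias_spec : Claim_equal_conteoEtnias := by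
  intro lista _ _
  show conteoEtnias lista = conteoEtnias_alt lista
  show (let st := (PySem.List.pyRange 0 (PySem.List.len lista) 1).foldl
          (fun st i => pvStepA st (PySem.List.pyGetD lista i [])) ((0 : Int), (0 : Int), (0 : Int), (0 : Int), (0 : Int), (0 : Int))
        [st.2.1, st.2.2.2.2.2, st.2.2.1, st.2.2.2.2.1, st.2.2.2.1, st.1]) = conteoEtnias_alt lista
  rw [PySem.List.foldl_pyRange_zero_pyGetD lista ([] : List String) pvStepA
        ((0 : Int), (0 : Int), (0 : Int), (0 : Int), (0 : Int), (0 : Int)), pvFoldA]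
  unfold conteoEtnias_alt pvKEYS
  simp only [List.map, pvCountB]
  simp
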